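-- pv_equiv track=rewrite | github.com/M-Abdul-RAFAY/Google-Scraper | tools/utils.py | merge_business_data
-- ===== SOURCE A (Python) =====
-- from typing import List, Dict, Any, Optional
--
-- def merge_business_data(businesses: List[Dict]) -> List[Dict]:
--     """Merge duplicate businesses based on name and address."""
--     seen = {}
--     merged = []
--
--     for business in businesses:
--         key = f"{business.get('name', '')}-{business.get('address', '')}"
--
--         if key not in seen:
--             seen[key] = business
--             merged.append(business)
--         else:
--             # Merge additional data
--             existing = seen[key]
--             for k, v in business.items():
--                 if not existing.get(k) and v:
--                     existing[k] = v
--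
--     return merged
-- ===== SOURCE B (Python) =====
-- from typing import List, Dict
--
--
-- def _fill(acc: Dict, other: Dict) -> Dict:
--     """Copy into acc every field of other whose slot in acc is empty/missing."""
--     for k, v in other.items():
--         if not acc.get(k) and v:
--             acc[k] = v
--     return acc
--
--
-- def merge_business_data(businesses: List[Dict]) -> List[Dict]:
--     """Merge duplicate businesses based on name and address."""
--     # pass 1: group the businesses by their name-address key, first-seen order
--     groups: Dict[str, List[Dict]] = {}
--     for business in businesses:
--         key = f"{business.get('name', '')}-{business.get('address', '')}"
--         groups.setdefault(key, []).append(business)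
--     # pass 2: fold each group's tail into its first business (mutated in place)
--     result = []
--     for group in groups.values():
--         acc = group[0]
--         for business in group[1:]:
--             _fill(acc, business)
--         result.append(acc)
--     return result
-- ===== Notes on version B (the rewrite author's own statement) =====
-- stated objective: alternative
-- what changed: Replaces A's single pass that merges each duplicate into an aliased seen-dict entry as it arrives by a two-pass group-then-fold: pass one buckets the businesses by their name-address key in first-seen order, pass two folds each bucket's tail into its first business.
import Mathlib
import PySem

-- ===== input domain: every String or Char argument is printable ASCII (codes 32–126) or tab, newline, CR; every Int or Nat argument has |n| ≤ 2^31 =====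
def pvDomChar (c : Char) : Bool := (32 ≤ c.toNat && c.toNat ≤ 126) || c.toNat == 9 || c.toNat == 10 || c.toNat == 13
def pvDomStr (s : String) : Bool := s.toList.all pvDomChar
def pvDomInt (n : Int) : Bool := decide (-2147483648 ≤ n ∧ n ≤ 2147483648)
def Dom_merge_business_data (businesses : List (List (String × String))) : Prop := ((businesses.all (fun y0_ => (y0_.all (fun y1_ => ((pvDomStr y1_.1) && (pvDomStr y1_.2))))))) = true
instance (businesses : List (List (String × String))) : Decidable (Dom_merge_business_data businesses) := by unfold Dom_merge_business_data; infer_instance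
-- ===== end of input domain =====

-- B replaces A's one-pass seen-dict-with-aliased-mutation by a two-pass group-then-fold
-- decomposition (objective: alternative, same cost). Equivalence is about the RETURN value;
-- both Pythons mutate the first business of each duplicate group in place identically.

-- the f-string key f"{b.get('name','')}-{b.get('address','')}" (shared by both Pythons)
def pvKey (b : PySem.Dict String String) : String :=
  PySem.Str.join "-" [b.getD "name" "", b.getD "address" ""]

-- ===== PORT A =====
-- Python's `merged` holds references to the very objects stored in `seen`, mutated later;
-- modelled by keeping the keys in `merged` and reading the final object out of `seen` at the end.
def merge_business_data (businesses : List (List (String × String))) : List (List (String × String)) :=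
  let st := businesses.foldl
    (fun (st : PySem.Dict String (PySem.Dict String String) × List String) bl =>
      let b := PySem.Dict.mk bl
      let key := pvKey b
      if st.1.contains key = false then
        (st.1.insert key b, st.2 ++ [key])
      else
        -- existing = seen[key]; for k, v in business.items(): if not existing.get(k) and v: existing[k] = v
        (st.1.insert key
          (b.items.foldl
            (fun e kv => if e.getD kv.1 "" = "" ∧ kv.2 ≠ "" then e.insert kv.1 kv.2 else e)
            (st.1.getD key PySem.Dict.empty)),
         st.2))
    (PySem.Dict.empty, [])
  st.2.map (fun key => (st.1.getD key PySem.Dict.empty).items)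

-- ===== PORT B =====
-- _fill(acc, other): copy every field of other whose slot in acc is empty/missing
def pvFill (acc other : PySem.Dict String String) : PySem.Dict String String :=
  other.items.foldl
    (fun acc kv => if acc.getD kv.1 "" = "" ∧ kv.2 ≠ "" then acc.insert kv.1 kv.2 else acc)
    acc

def merge_business_data_alt (businesses : List (List (String × String))) : List (List (String × String)) :=
  -- pass 1: groups.setdefault(key, []).append(business)  ≡  modify key [] (· ++ [business])
  let groups := businesses.foldl
    (fun (g : PySem.Dict String (List (PySem.Dict String String))) bl =>
      let b := PySem.Dict.mk bl
      g.modify (pvKey b) [] (· ++ [b]))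
    PySem.Dict.empty
  -- pass 2: fold each group's tail into its first business
  groups.values.map (fun group =>
    match group with
    | [] => []
    | acc :: rest => (rest.foldl pvFill acc).items)

-- ===== PRECONDITION & SPEC =====
def Spec_merge_business_data (businesses : List (List (String × String))) (out : List (List (String × String))) : Prop := out = merge_business_data_alt businesses
instance (businesses : List (List (String × String))) (out : List (List (String × String))) : Decidable (Spec_merge_business_data businesses out) := by unfold Spec_merge_business_data; infer_instance

-- ===== CLAIM (what is proved, stated in full; the proofs are below) =====
def Claim_equal_merge_business_data : Prop := ∀ (businesses : List (List (String × String))), Dom_merge_business_data businesses → Spec_merge_business_data businesses (merge_business_data businesses)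

-- ===== LEMMAS AND PROOFS =====

-- the merged object a group [a, r₁, …] of duplicates ends up as
def pvFoldGroup (grp : List (PySem.Dict String String)) : PySem.Dict String String :=
  match grp with
  | [] => PySem.Dict.empty
  | a :: r => r.foldl pvFill a

-- A's `seen` dict, reconstructed from B's groups dict
def pvSeenOf (g : PySem.Dict String (List (PySem.Dict String String))) :
    PySem.Dict String (PySem.Dict String String) :=
  PySem.Dict.mk (g.items.map (fun p => (p.1, pvFoldGroup p.2)))

lemma contains_pvSeenOf (g : PySem.Dict String (List (PySem.Dict String String))) (k : String) :
    (pvSeenOf g).contains k = g.contains k := by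
  simp [pvSeenOf, PySem.Dict.contains, List.any_map, Function.comp_def]

lemma get?_pvSeenOf (g : PySem.Dict String (List (PySem.Dict String String))) (k : String) :
    (pvSeenOf g).get? k = (g.get? k).map pvFoldGroup := by
  simp [pvSeenOf, PySem.Dict.get?, List.find?_map, Function.comp_def]

lemma getD_pvSeenOf (g : PySem.Dict String (List (PySem.Dict String String))) (k : String) :
    (pvSeenOf g).getD k PySem.Dict.empty = pvFoldGroup (g.getD k []) := by
  simp only [PySem.Dict.getD_eq_get?_getD, get?_pvSeenOf]
  cases g.get? k <;> simp [pvFoldGroup]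

lemma pvFoldGroup_append_singleton (grp : List (PySem.Dict String String))
    (b : PySem.Dict String String) (h : grp ≠ []) :
    pvFoldGroup (grp ++ [b]) = pvFill (pvFoldGroup grp) b := by
  cases grp with
  | nil => exact absurd rfl h
  | cons a r => simp [pvFoldGroup, pvFill]

-- one step of A's loop equals one step of B's grouping pass, through pvSeenOf
lemma pv_step_eq (g : PySem.Dict String (List (PySem.Dict String String)))
    (bl : List (String × String)) (hn : ∀ p ∈ g.items, p.2 ≠ []) :
    (if (pvSeenOf g).contains (pvKey (PySem.Dict.mk bl)) = false then
       ((pvSeenOf g).insert (pvKey (PySem.Dict.mk bl)) (PySem.Dict.mk bl),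
        g.keys ++ [pvKey (PySem.Dict.mk bl)])
     else
       ((pvSeenOf g).insert (pvKey (PySem.Dict.mk bl))
         ((PySem.Dict.mk bl).items.foldl
           (fun e kv => if e.getD kv.1 "" = "" ∧ kv.2 ≠ "" then e.insert kv.1 kv.2 else e)
           ((pvSeenOf g).getD (pvKey (PySem.Dict.mk bl)) PySem.Dict.empty)),
        g.keys))
    = (pvSeenOf (g.modify (pvKey (PySem.Dict.mk bl)) [] (· ++ [PySem.Dict.mk bl])),
       (g.modify (pvKey (PySem.Dict.mk bl)) [] (· ++ [PySem.Dict.mk bl])).keys) := by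
  simp only [PySem.Dict.modify]
  set b := PySem.Dict.mk bl with hb
  set k := pvKey b with hk
  by_cases hc : g.contains k = true
  · -- duplicate key: A merges into the existing object, B extends the group
    obtain ⟨grp, hgrp⟩ : ∃ grp, g.get? k = some grp :=
      Option.isSome_iff_exists.mp (by rw [← PySem.Dict.contains_eq_isSome_get?]; exact hc)
    have hmem : (k, grp) ∈ g.items := PySem.Dict.mem_items_of_get?_eq_some _ hgrp
    have hne : grp ≠ [] := hn _ hmem
    have hgetD : g.getD k [] = grp := PySem.Dict.getD_of_get?_eq_some _ _ hgrp
    have hcs : (pvSeenOf g).contains k = true := by rw [contains_pvSeenOf]; exact hc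
    rw [if_neg (by simp [hcs])]
    refine Prod.ext ?_ ?_
    · -- seen dicts agree
      apply PySem.Dict.ext
      dsimp only
      rw [getD_pvSeenOf, hgetD]
      rw [PySem.Dict.items_insert_of_contains _ _ hcs]
      conv_rhs => rw [pvSeenOf]
      rw [PySem.Dict.items, PySem.Dict.items_insert_of_contains _ _ hc]
      simp only [pvSeenOf, List.map_map]
      apply List.map_congr_left
      intro p _
      by_cases hpk : p.1 == k
      · simp only [Function.comp_def, hpk, if_true]
        rw [pvFoldGroup_append_singleton grp b hne]
        rfl
      · have hpk' : p.1 ≠ k := by simpa using hpk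
        simp [hpk']
    · -- merged key lists agree
      dsimp only
      rw [PySem.Dict.keys_insert_of_contains _ _ hc]
  · -- fresh key: both append
    have hc' : g.contains k = false := by simpa using hc
    have hcs : (pvSeenOf g).contains k = false := by rw [contains_pvSeenOf]; exact hc'
    have hgetD : g.getD k [] = [] := PySem.Dict.getD_of_not_contains _ _ hc'
    rw [if_pos (by simp [hcs]), hgetD]
    refine Prod.ext ?_ ?_
    · apply PySem.Dict.ext
      dsimp only
      rw [PySem.Dict.items_insert_of_not_contains _ _ hcs]
      conv_rhs => rw [pvSeenOf]
      rw [PySem.Dict.items, PySem.Dict.items_insert_of_not_contains _ _ hc']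
      simp [pvSeenOf, pvFoldGroup]
    · dsimp only
      rw [PySem.Dict.keys_insert_of_not_contains _ _ hc']

-- the step keeps every group nonempty
lemma pv_step_nonempty (g : PySem.Dict String (List (PySem.Dict String String)))
    (bl : List (String × String)) (hn : ∀ p ∈ g.items, p.2 ≠ []) :
    ∀ p ∈ (g.modify (pvKey (PySem.Dict.mk bl)) [] (· ++ [PySem.Dict.mk bl])).items, p.2 ≠ [] := by
  intro p hp
  simp only [PySem.Dict.modify] at hp
  rcases (PySem.Dict.mem_items_insert _ _ _ _).mp hp with h | ⟨h, _⟩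
  · subst h; simp
  · exact hn _ h

-- A's whole loop equals B's grouping pass, through pvSeenOf
lemma pv_loop_eq (bs : List (List (String × String)))
    (g : PySem.Dict String (List (PySem.Dict String String)))
    (hn : ∀ p ∈ g.items, p.2 ≠ []) :
    bs.foldl
      (fun (st : PySem.Dict String (PySem.Dict String String) × List String) bl =>
        if st.1.contains (pvKey (PySem.Dict.mk bl)) = false then
          (st.1.insert (pvKey (PySem.Dict.mk bl)) (PySem.Dict.mk bl),
           st.2 ++ [pvKey (PySem.Dict.mk bl)])
        else
          (st.1.insert (pvKey (PySem.Dict.mk bl))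
            ((PySem.Dict.mk bl).items.foldl
              (fun e kv => if e.getD kv.1 "" = "" ∧ kv.2 ≠ "" then e.insert kv.1 kv.2 else e)
              (st.1.getD (pvKey (PySem.Dict.mk bl)) PySem.Dict.empty)),
           st.2))
      (pvSeenOf g, g.keys)
    = (pvSeenOf (bs.foldl (fun g bl => g.modify (pvKey (PySem.Dict.mk bl)) [] (· ++ [PySem.Dict.mk bl])) g),
       (bs.foldl (fun g bl => g.modify (pvKey (PySem.Dict.mk bl)) [] (· ++ [PySem.Dict.mk bl])) g).keys) := by
  induction bs generalizing g with
  | nil => rfl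
  | cons bl bs ih =>
    simp only [List.foldl_cons]
    rw [pv_step_eq g bl hn]
    exact ih _ (pv_step_nonempty g bl hn)

-- groups built by the pass have nonempty values and nodup keys
lemma pv_groups_nonempty (bs : List (List (String × String))) :
    ∀ p ∈ (bs.foldl (fun g bl => g.modify (pvKey (PySem.Dict.mk bl)) [] (· ++ [PySem.Dict.mk bl]))
        (PySem.Dict.empty : PySem.Dict String (List (PySem.Dict String String)))).items, p.2 ≠ [] := by
  have : ∀ (g : PySem.Dict String (List (PySem.Dict String String))),
      (∀ p ∈ g.items, p.2 ≠ []) →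
      ∀ p ∈ (bs.foldl (fun g bl => g.modify (pvKey (PySem.Dict.mk bl)) [] (· ++ [PySem.Dict.mk bl])) g).items,
        p.2 ≠ [] := by
    induction bs with
    | nil => intro g hg; exact hg
    | cons bl bs ih =>
      intro g hg
      exact ih _ (pv_step_nonempty g bl hg)
  exact this PySem.Dict.empty (by simp [PySem.Dict.empty])

lemma pv_groups_nodup (bs : List (List (String × String))) :
    (bs.foldl (fun g bl => g.modify (pvKey (PySem.Dict.mk bl)) [] (· ++ [PySem.Dict.mk bl]))
      (PySem.Dict.empty : PySem.Dict String (List (PySem.Dict String String)))).keys.Nodup := by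
  exact PySem.Dict.nodup_keys_foldl_modify_key bs (fun bl => pvKey (PySem.Dict.mk bl)) _ _ _
    PySem.Dict.nodup_keys_empty

-- ===== VERDICT (by name: the statement is the Claim_ definition above) =====
theorem merge_business_data_spec : Claim_equal_merge_business_data := by
  intro businesses _
  unfold Spec_merge_business_data merge_business_data merge_business_data_alt
  simp only []
  rw [show ((PySem.Dict.empty : PySem.Dict String (PySem.Dict String String)), ([] : List String))
        = (pvSeenOf PySem.Dict.empty, (PySem.Dict.empty : PySem.Dict String (List (PySem.Dict String String))).keys)
      from rfl]
  rw [pv_loop_eq businesses PySem.Dict.empty (by simp [PySem.Dict.empty])]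
  set g := businesses.foldl (fun g bl => g.modify (pvKey (PySem.Dict.mk bl)) [] (· ++ [PySem.Dict.mk bl]))
    (PySem.Dict.empty : PySem.Dict String (List (PySem.Dict String String))) with hgdef
  have hnd : g.keys.Nodup := pv_groups_nodup businesses
  have hne : ∀ p ∈ g.items, p.2 ≠ [] := pv_groups_nonempty businesses
  show g.keys.map (fun key => ((pvSeenOf g).getD key PySem.Dict.empty).items)
      = g.values.map _
  rw [show g.keys = g.items.map (fun p => p.1) from rfl,
      show g.values = g.items.map (fun p => p.2) from rfl,
      List.map_map, List.map_map]
  apply List.map_congr_left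
  intro p hp
  simp only [Function.comp]
  rw [getD_pvSeenOf, PySem.Dict.getD_of_mem_items _ (show (p.1, p.2) ∈ g.items by simpa using hp) hnd]
  cases hgrp : p.2 with
  | nil => exact absurd hgrp (hne p hp)
  | cons a r => simp [pvFoldGroup]
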